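-- pv_equiv track=rewrite | github.com/stariqmetro/pompy | process_tms_script.py | find_start_stop
-- ===== SOURCE A (Python) =====
-- from itertools import product
--
-- def find_start_stop(start, stop):
--         cross_join = product(start, stop) # cross join the two lists
--         path = 99 # default value of path from one index to another (not miles)
--         result = () # default value
--
--         for join in cross_join:
--             diff = join[1] - join[0]
--             # if the current different between two indices is less than path, update path
--             if 0 < diff < path:
--                 path = diff
--                 result = join
--
--         return result[0], result[1]
-- ===== SOURCE B (Python) =====
-- def find_start_stop(start, stop):
--     # sort the distinct values once, then one merge-style sweep finds the
--     # minimal positive difference (capped below 99, as in the original);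
--     # a final scan of start in original order recovers the earliest pair.
--     ss = sorted(set(start))
--     tt = sorted(set(stop))
--     best = 99
--     j = 0
--     for s in ss:
--         while j < len(tt) and tt[j] <= s:
--             j += 1
--         if j < len(tt):
--             best = min(best, tt[j] - s)
--     if best < 99:
--         stops = set(stop)
--         for s in start:
--             if s + best in stops:
--                 return s, s + best
-- ===== Notes on version B (the rewrite author's own statement) =====
-- stated objective: faster
-- what changed: Replaces the O(n*m) cross-join scan with sort-both-lists + a single two-pointer sweep to find the minimal positive difference, then one pass over start in original order to recover the earliest pair.
-- outside the precondition, e.g. on find_start_stop([1], [1]): A raises IndexError, B returns None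
import Mathlib
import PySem

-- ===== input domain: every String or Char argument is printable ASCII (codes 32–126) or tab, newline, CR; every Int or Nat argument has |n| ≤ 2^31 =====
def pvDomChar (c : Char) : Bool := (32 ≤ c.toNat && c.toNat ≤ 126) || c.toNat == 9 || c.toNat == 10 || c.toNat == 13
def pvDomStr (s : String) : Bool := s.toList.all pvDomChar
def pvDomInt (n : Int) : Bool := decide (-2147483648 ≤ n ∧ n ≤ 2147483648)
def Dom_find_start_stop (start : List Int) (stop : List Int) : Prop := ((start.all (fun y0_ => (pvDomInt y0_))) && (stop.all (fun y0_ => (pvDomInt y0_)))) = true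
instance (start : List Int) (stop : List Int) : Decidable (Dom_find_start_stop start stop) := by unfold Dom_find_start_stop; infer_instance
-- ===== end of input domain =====

-- B replaces A's O(n*m) cross-join scan by sorting the distinct values and a single
-- two-pointer sweep for the minimal positive difference (capped below 99 like A),
-- then one pass over `start` in original order recovers the earliest pair (objective: faster).

-- ===== PORT A =====
-- one step of A's loop body: state = (path, result); result () is `none`
def stepA (acc : Int × Option (Int × Int)) (j : Int × Int) : Int × Option (Int × Int) :=
  if 0 < j.2 - j.1 ∧ j.2 - j.1 < acc.1 then (j.2 - j.1, some j) else acc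

def find_start_stop (start : List Int) (stop : List Int) : Int × Int :=
  let cross_join := start.flatMap (fun s => stop.map (fun t => (s, t)))  -- itertools.product
  let r := cross_join.foldl stepA (99, none)
  match r.2 with
  | some j => (j.1, j.2)
  | none => (0, 0)    -- Python raises IndexError on result[0] here; excluded by Pre_

-- ===== PORT B =====
-- the `for s in ss` loop with pointer j into tt; advancing j = dropWhile on the suffix
def sweepB : List Int → List Int → Int → Int
  | [], _, best => best
  | s :: rest, tt, best =>
      let tt' := tt.dropWhile (fun t => decide (t ≤ s))
      match tt' with
      | [] => sweepB rest tt' best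
      | t :: _ => sweepB rest tt' (min best (t - s))

def find_start_stop_alt (start : List Int) (stop : List Int) : Int × Int :=
  let ss := PySem.List.sorted (PySem.Set.ofList start) (fun x => x) false
  let tt := PySem.List.sorted (PySem.Set.ofList stop) (fun x => x) false
  let best := sweepB ss tt 99
  if best < 99 then
    match start.find? (fun s => PySem.Set.contains (PySem.Set.ofList stop) (s + best)) with
    | some s => (s, s + best)
    | none => (0, 0)    -- unreachable: best < 99 is achieved by some pair; Python falls through only when best = 99
  else (0, 0)           -- Python returns None (falls through); excluded by Pre_

-- ===== PRECONDITION & SPEC =====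
-- Pre_ excludes exactly the inputs with no pair 0 < stop_t - start_s < 99: there A's
-- `result` stays `()` and `result[0]` raises IndexError (A never returns).
def Pre_find_start_stop (start : List Int) (stop : List Int) : Prop :=
  ∃ s ∈ start, ∃ t ∈ stop, 0 < t - s ∧ t - s < 99
instance (start : List Int) (stop : List Int) : Decidable (Pre_find_start_stop start stop) := by
  unfold Pre_find_start_stop; infer_instance

def pvWitness_find_start_stop : List Int × List Int := ([0], [5])

def Spec_find_start_stop (start : List Int) (stop : List Int) (out : Int × Int) : Prop := out = find_start_stop_alt start stop
instance (start : List Int) (stop : List Int) (out : Int × Int) : Decidable (Spec_find_start_stop start stop out) := by unfold Spec_find_start_stop; infer_instance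

-- ===== CLAIM (what is proved, stated in full; the proofs are below) =====
def Claim_equal_find_start_stop : Prop := ∀ (start : List Int) (stop : List Int), Dom_find_start_stop start stop → Pre_find_start_stop start stop → Spec_find_start_stop start stop (find_start_stop start stop)

-- ===== LEMMAS AND PROOFS =====

-- path evolution of A's loop (first component of the fold state)
def pathF (p : Int) (L : List (Int × Int)) : Int :=
  L.foldl (fun a j => if 0 < j.2 - j.1 ∧ j.2 - j.1 < a then j.2 - j.1 else a) p

theorem pathF_le (L : List (Int × Int)) (p : Int) : pathF p L ≤ p := by
  induction L generalizing p with
  | nil => simp [pathF]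
  | cons j rest ih =>
      simp only [pathF, List.foldl_cons]
      split_ifs with h
      · exact le_trans (ih _) (le_of_lt h.2)
      · exact ih _

theorem pathF_pos (L : List (Int × Int)) (p : Int) (hp : 0 < p) : 0 < pathF p L := by
  induction L generalizing p with
  | nil => simpa [pathF]
  | cons j rest ih =>
      simp only [pathF, List.foldl_cons]
      split_ifs with h
      · exact ih _ h.1
      · exact ih _ hp

theorem pathF_le_mem (L : List (Int × Int)) (p : Int) (j : Int × Int)
    (hj : j ∈ L) (hd : 0 < j.2 - j.1) : pathF p L ≤ j.2 - j.1 ∨ p ≤ j.2 - j.1 := by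
  induction L generalizing p with
  | nil => cases hj
  | cons k rest ih =>
      simp only [pathF, List.foldl_cons]
      rcases List.mem_cons.mp hj with rfl | hmem
      · split_ifs with h
        · exact Or.inl (pathF_le _ _)
        · right; omega
      · split_ifs with h
        · rcases ih _ hmem with h1 | h1
          · exact Or.inl h1
          · exact Or.inl (le_trans (pathF_le _ _) h1)
        · exact ih _ hmem

theorem pathF_mem (L : List (Int × Int)) (p : Int) :
    pathF p L = p ∨ ∃ j ∈ L, 0 < j.2 - j.1 ∧ j.2 - j.1 = pathF p L := by
  induction L generalizing p with
  | nil => left; rfl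
  | cons k rest ih =>
      simp only [pathF, List.foldl_cons]
      split_ifs with h
      · rcases ih (k.2 - k.1) with h1 | ⟨j, hj, hd, he⟩
        · right; exact ⟨k, List.mem_cons_self, h.1, h1.symm⟩
        · right; exact ⟨j, List.mem_cons_of_mem _ hj, hd, he⟩
      · rcases ih p with h1 | ⟨j, hj, hd, he⟩
        · left; exact h1
        · right; exact ⟨j, List.mem_cons_of_mem _ hj, hd, he⟩

theorem foldA_snd (L : List (Int × Int)) (p : Int) (res : Option (Int × Int)) (hp : 0 < p) :
    (L.foldl stepA (p, res)).2 =
      if pathF p L = p then res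
      else L.find? (fun j => decide (j.2 - j.1 = pathF p L)) := by
  induction L generalizing p res with
  | nil => simp [pathF]
  | cons k rest ih =>
      by_cases h : 0 < k.2 - k.1 ∧ k.2 - k.1 < p
      · have hfold : ((k :: rest).foldl stepA (p, res)) = rest.foldl stepA (k.2 - k.1, some k) := by
          simp only [List.foldl_cons, stepA]; rw [if_pos h]
        have hpath : pathF p (k :: rest) = pathF (k.2 - k.1) rest := by
          simp only [pathF, List.foldl_cons]; rw [if_pos h]
        have hle : pathF (k.2 - k.1) rest ≤ k.2 - k.1 := pathF_le _ _
        rw [hfold, hpath, ih _ _ h.1]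
        by_cases h2 : pathF (k.2 - k.1) rest = k.2 - k.1
        · rw [if_pos h2, if_neg (by omega), List.find?_cons_of_pos (by simp [h2])]
        · rw [if_neg h2, if_neg (by omega), List.find?_cons_of_neg (by simp; omega)]
      · have hfold : ((k :: rest).foldl stepA (p, res)) = rest.foldl stepA (p, res) := by
          simp only [List.foldl_cons, stepA]; rw [if_neg h]
        have hpath : pathF p (k :: rest) = pathF p rest := by
          simp only [pathF, List.foldl_cons]; rw [if_neg h]
        rw [hfold, hpath, ih _ _ hp]
        by_cases h2 : pathF p rest = p
        · rw [if_pos h2, if_pos h2]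
        · have h3 : pathF p rest < p := lt_of_le_of_ne (pathF_le _ _) h2
          have h4 : 0 < pathF p rest := pathF_pos _ _ hp
          rw [if_neg h2, if_neg h2, List.find?_cons_of_neg (by simp; omega)]

-- B side: for a sorted list, advancing the pointer past all elements ≤ s keeps exactly the elements > s
theorem dropWhile_sorted_eq_filter (tt : List Int) (s : Int) (h : tt.Pairwise (· ≤ ·)) :
    tt.dropWhile (fun t => decide (t ≤ s)) = tt.filter (fun t => decide (s < t)) := by
  induction tt with
  | nil => rfl
  | cons t rest ih =>
      rcases List.pairwise_cons.mp h with ⟨h1, h2⟩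
      by_cases hts : t ≤ s
      · rw [List.dropWhile_cons_of_pos (by simpa using hts), List.filter_cons_of_neg (by simp only [decide_eq_true_eq]; omega), ih h2]
      · rw [List.dropWhile_cons_of_neg (by simpa using hts), List.filter_cons_of_pos (by simp only [decide_eq_true_eq]; omega)]
        have : rest.filter (fun t => decide (s < t)) = rest :=
          List.filter_eq_self.mpr (fun x hx => by have := h1 x hx; simp only [decide_eq_true_eq]; omega)
        rw [this]

theorem sweepB_le (ss tt : List Int) (b : Int) : sweepB ss tt b ≤ b := by
  induction ss generalizing tt b with
  | nil => simp [sweepB]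
  | cons s rest ih =>
      simp only [sweepB]
      cases htt' : tt.dropWhile (fun t => decide (t ≤ s)) with
      | nil => exact ih _ _
      | cons t rest' => exact le_trans (ih _ _) (min_le_left _ _)

theorem sweepB_le_mem (ss tt : List Int) (b : Int)
    (hss : ss.Pairwise (· ≤ ·)) (htt : tt.Pairwise (· ≤ ·))
    (s t : Int) (hs : s ∈ ss) (ht : t ∈ tt) (hst : s < t) :
    sweepB ss tt b ≤ t - s := by
  induction ss generalizing tt b with
  | nil => cases hs
  | cons s' rest ih =>
      rcases List.pairwise_cons.mp hss with ⟨hss1, hss2⟩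
      have hflt := dropWhile_sorted_eq_filter tt s' htt
      have htt' : (tt.dropWhile (fun t => decide (t ≤ s'))).Pairwise (· ≤ ·) :=
        List.Pairwise.sublist (List.dropWhile_sublist _) htt
      simp only [sweepB]
      rcases List.mem_cons.mp hs with rfl | hsrest
      · -- s is the head: the first remaining element of tt is the best partner
        have htmem : t ∈ tt.dropWhile (fun t => decide (t ≤ s)) := by
          rw [hflt]; exact List.mem_filter.mpr ⟨ht, by simpa using hst⟩
        cases h0 : tt.dropWhile (fun t => decide (t ≤ s)) with
        | nil => rw [h0] at htmem; cases htmem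
        | cons t0 rest' =>
            rw [h0] at htmem htt'
            have ht0 : t0 ≤ t := by
              rcases List.mem_cons.mp htmem with rfl | hmem
              · exact le_refl _
              · exact (List.pairwise_cons.mp htt').1 _ hmem
            calc sweepB rest (t0 :: rest') (min b (t0 - s)) ≤ min b (t0 - s) := sweepB_le _ _ _
              _ ≤ t0 - s := min_le_right _ _
              _ ≤ t - s := by omega
      · -- s is further along: t is still in the remaining suffix of tt
        have hs's : s' ≤ s := hss1 _ hsrest
        have htmem : t ∈ tt.dropWhile (fun t => decide (t ≤ s')) := by
          rw [hflt]; exact List.mem_filter.mpr ⟨ht, by simp; omega⟩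
        cases h0 : tt.dropWhile (fun t => decide (t ≤ s')) with
        | nil => rw [h0] at htmem; cases htmem
        | cons t0 rest' =>
            rw [h0] at htmem htt'
            exact ih _ _ hss2 htt' hsrest htmem

theorem sweepB_mem (ss tt : List Int) (b : Int) (htt : tt.Pairwise (· ≤ ·)) :
    sweepB ss tt b = b ∨ ∃ s ∈ ss, ∃ t ∈ tt, s < t ∧ t - s = sweepB ss tt b := by
  induction ss generalizing tt b with
  | nil => left; rfl
  | cons s rest ih =>
      have hflt := dropWhile_sorted_eq_filter tt s htt
      have hsub : ∀ x, x ∈ tt.dropWhile (fun t => decide (t ≤ s)) → x ∈ tt :=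
        fun x hx => (List.dropWhile_sublist _).mem hx
      have htt' : (tt.dropWhile (fun t => decide (t ≤ s))).Pairwise (· ≤ ·) :=
        List.Pairwise.sublist (List.dropWhile_sublist _) htt
      simp only [sweepB]
      cases h0 : tt.dropWhile (fun t => decide (t ≤ s)) with
      | nil =>
          rcases ih ([] : List Int) b List.Pairwise.nil with h | ⟨s1, hs1, t1, ht1, hlt, he⟩
          · left; exact h
          · cases ht1
      | cons t0 rest' =>
          have ht0tt : t0 ∈ tt := hsub _ (by rw [h0]; exact List.mem_cons_self)
          have hst0 : s < t0 := by
            have : t0 ∈ tt.filter (fun t => decide (s < t)) := by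
              rw [← hflt, h0]; exact List.mem_cons_self
            simpa using (List.mem_filter.mp this).2
          have htt'' : (t0 :: rest').Pairwise (fun a b : Int => a ≤ b) := by
            rw [← h0]; exact htt'
          rcases ih (t0 :: rest') (min b (t0 - s)) htt'' with h | ⟨s1, hs1, t1, ht1, hlt, he⟩
          · rcases le_total b (t0 - s) with hmin | hmin
            · left
              show sweepB rest (t0 :: rest') (min b (t0 - s)) = b
              rw [h, min_eq_left hmin]
            · right
              refine ⟨s, List.mem_cons_self, t0, ht0tt, hst0, ?_⟩
              show t0 - s = sweepB rest (t0 :: rest') (min b (t0 - s))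
              rw [h, min_eq_right hmin]
          · right
            exact ⟨s1, List.mem_cons_of_mem _ hs1, t1, hsub _ (by rw [h0]; exact ht1), hlt, he⟩

-- the two characterizations pin the same value
theorem min_uniq (start stop : List Int) (x y : Int)
    (hx1 : x ≤ 99) (hx2 : ∀ s ∈ start, ∀ t ∈ stop, 0 < t - s → x ≤ t - s)
    (hx3 : x = 99 ∨ ∃ s ∈ start, ∃ t ∈ stop, 0 < t - s ∧ t - s = x)
    (hy1 : y ≤ 99) (hy2 : ∀ s ∈ start, ∀ t ∈ stop, 0 < t - s → y ≤ t - s)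
    (hy3 : y = 99 ∨ ∃ s ∈ start, ∃ t ∈ stop, 0 < t - s ∧ t - s = y) : x = y := by
  rcases hx3 with rfl | ⟨s, hs, t, ht, hd, he⟩ <;>
    rcases hy3 with rfl | ⟨s', hs', t', ht', hd', he'⟩
  · rfl
  · have := hx2 s' hs' t' ht' hd'; omega
  · have := hy2 s hs t ht hd; omega
  · have h1 := hx2 s' hs' t' ht' hd'
    have h2 := hy2 s hs t ht hd
    omega

theorem find_stop (stop : List Int) (s g : Int) :
    stop.find? (fun t => decide (t - s = g)) = if (s + g) ∈ stop then some (s + g) else none := by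
  induction stop with
  | nil => simp
  | cons t rest ih =>
      by_cases h : t - s = g
      · rw [List.find?_cons_of_pos (by simpa), if_pos (show s + g ∈ t :: rest by simp only [List.mem_cons]; left; omega)]
        have : t = s + g := by omega
        rw [this]
      · rw [List.find?_cons_of_neg (by simpa), ih]
        by_cases h2 : (s + g) ∈ rest
        · rw [if_pos h2, if_pos (List.mem_cons_of_mem _ h2)]
        · rw [if_neg h2, if_neg (by simp only [List.mem_cons, h2, or_false]; omega)]

theorem find_cross (start stop : List Int) (g : Int) :
    (start.flatMap (fun s => stop.map (fun t => (s, t)))).find?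
        (fun j => decide (j.2 - j.1 = g)) =
      (start.find? (fun s => decide ((s + g) ∈ stop))).map (fun s => (s, s + g)) := by
  induction start with
  | nil => simp
  | cons s rest ih =>
      rw [List.flatMap_cons, List.find?_append, List.find?_map]
      have hblock : stop.find? ((fun j : Int × Int => decide (j.2 - j.1 = g)) ∘ (fun t => (s, t)))
          = if (s + g) ∈ stop then some (s + g) else none := by
        rw [← find_stop stop s g]; rfl
      by_cases hmem : (s + g) ∈ stop
      · rw [hblock, if_pos hmem, List.find?_cons_of_pos (by simpa)]
        rfl
      · rw [hblock, if_neg hmem, List.find?_cons_of_neg (by simpa), ih]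
        rfl

-- ===== VERDICT (by name: the statement is the Claim_ definition above) =====
theorem find_start_stop_spec : Claim_equal_find_start_stop := by
  intro start stop _ hpre
  unfold Spec_find_start_stop
  obtain ⟨s0, hs0, t0, ht0, hd0, hd99⟩ := hpre
  have hmem_cross : ∀ a b : Int,
      (a, b) ∈ start.flatMap (fun s => stop.map (fun t => (s, t))) ↔ a ∈ start ∧ b ∈ stop := by
    intro a b
    simp only [List.mem_flatMap, List.mem_map, Prod.mk.injEq]
    constructor
    · rintro ⟨s, hs, t, ht, rfl, rfl⟩; exact ⟨hs, ht⟩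
    · rintro ⟨ha, hb⟩; exact ⟨a, ha, b, hb, rfl, rfl⟩
  have hssmem : ∀ x : Int, x ∈ PySem.List.sorted (PySem.Set.ofList start) (fun x => x) false ↔ x ∈ start := by
    intro x; rw [PySem.List.mem_sorted, PySem.Set.mem_ofList]
  have httmem : ∀ x : Int, x ∈ PySem.List.sorted (PySem.Set.ofList stop) (fun x => x) false ↔ x ∈ stop := by
    intro x; rw [PySem.List.mem_sorted, PySem.Set.mem_ofList]
  have hss_sorted : (PySem.List.sorted (PySem.Set.ofList start) (fun x => x) false).Pairwise (· ≤ ·) :=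
    (PySem.List.sorted_ofList_pairwise_lt (xs := start)).imp le_of_lt
  have htt_sorted : (PySem.List.sorted (PySem.Set.ofList stop) (fun x => x) false).Pairwise (· ≤ ·) :=
    (PySem.List.sorted_ofList_pairwise_lt (xs := stop)).imp le_of_lt
  have hA1 : pathF 99 (start.flatMap (fun s => stop.map (fun t => (s, t)))) ≤ 99 := pathF_le _ _
  have hA2 : ∀ s ∈ start, ∀ t ∈ stop, 0 < t - s →
      pathF 99 (start.flatMap (fun s => stop.map (fun t => (s, t)))) ≤ t - s := by
    intro s hs t ht hd
    rcases pathF_le_mem _ 99 (s, t) ((hmem_cross s t).mpr ⟨hs, ht⟩) (by simpa using hd) with h | h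
    · simpa using h
    · omega
  have hA3 : pathF 99 (start.flatMap (fun s => stop.map (fun t => (s, t)))) = 99 ∨
      ∃ s ∈ start, ∃ t ∈ stop, 0 < t - s ∧
        t - s = pathF 99 (start.flatMap (fun s => stop.map (fun t => (s, t)))) := by
    rcases pathF_mem (start.flatMap (fun s => stop.map (fun t => (s, t)))) 99 with h | ⟨j, hj, hd, he⟩
    · left; exact h
    · right
      obtain ⟨a, b⟩ := j
      rw [hmem_cross] at hj
      exact ⟨a, hj.1, b, hj.2, by simpa using hd, by simpa using he⟩
  have hB1 : sweepB (PySem.List.sorted (PySem.Set.ofList start) (fun x => x) false)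
      (PySem.List.sorted (PySem.Set.ofList stop) (fun x => x) false) 99 ≤ 99 := sweepB_le _ _ _
  have hB2 : ∀ s ∈ start, ∀ t ∈ stop, 0 < t - s →
      sweepB (PySem.List.sorted (PySem.Set.ofList start) (fun x => x) false)
        (PySem.List.sorted (PySem.Set.ofList stop) (fun x => x) false) 99 ≤ t - s := by
    intro s hs t ht hd
    exact sweepB_le_mem _ _ 99 hss_sorted htt_sorted s t ((hssmem s).mpr hs) ((httmem t).mpr ht) (by omega)
  have hB3 : sweepB (PySem.List.sorted (PySem.Set.ofList start) (fun x => x) false)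
      (PySem.List.sorted (PySem.Set.ofList stop) (fun x => x) false) 99 = 99 ∨
      ∃ s ∈ start, ∃ t ∈ stop, 0 < t - s ∧
        t - s = sweepB (PySem.List.sorted (PySem.Set.ofList start) (fun x => x) false)
          (PySem.List.sorted (PySem.Set.ofList stop) (fun x => x) false) 99 := by
    rcases sweepB_mem _ _ 99 htt_sorted with h | ⟨s, hs, t, ht, hlt, he⟩
    · left; exact h
    · right; exact ⟨s, (hssmem s).mp hs, t, (httmem t).mp ht, by omega, he⟩
  have hg : pathF 99 (start.flatMap (fun s => stop.map (fun t => (s, t)))) =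
      sweepB (PySem.List.sorted (PySem.Set.ofList start) (fun x => x) false)
        (PySem.List.sorted (PySem.Set.ofList stop) (fun x => x) false) 99 :=
    min_uniq start stop _ _ hA1 hA2 hA3 hB1 hB2 hB3
  have hlt99 : pathF 99 (start.flatMap (fun s => stop.map (fun t => (s, t)))) < 99 := by
    have := hA2 s0 hs0 t0 ht0 hd0; omega
  rcases hA3 with h99 | ⟨s1, hs1, t1, ht1, hp1, he1⟩
  · omega
  simp only [find_start_stop, find_start_stop_alt]
  rw [foldA_snd _ 99 none (by norm_num), if_neg (by omega), find_cross, ← hg, if_pos hlt99]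
  have hpred : (fun s => PySem.Set.contains (PySem.Set.ofList stop)
        (s + pathF 99 (start.flatMap (fun s => stop.map (fun t => (s, t)))))) =
      (fun s => decide ((s + pathF 99 (start.flatMap (fun s => stop.map (fun t => (s, t))))) ∈ stop)) := by
    funext s
    apply Bool.eq_iff_iff.mpr
    rw [PySem.Set.contains_iff, PySem.Set.mem_ofList, decide_eq_true_eq]
  rw [hpred]
  have hsome : (start.find? (fun s =>
      decide ((s + pathF 99 (start.flatMap (fun s => stop.map (fun t => (s, t))))) ∈ stop))).isSome := by
    apply List.find?_isSome.mpr
    refine ⟨s1, hs1, ?_⟩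
    have h' : s1 + pathF 99 (start.flatMap (fun s => stop.map (fun t => (s, t)))) = t1 := by omega
    rw [h']; simpa using ht1
  obtain ⟨s2, hs2⟩ := Option.isSome_iff_exists.mp hsome
  rw [hs2]
  rfl
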